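-- pv_equiv track=rewrite | github.com/yangjing6688/framework | ExtremeAutomation/Apis/NetworkElement/GeneratedApis/ParseApis/CLI/filemanagement/VOSS/base/baseversion/baseunit/FilemanagementCustomShowTools.py | check_config_file_exists_per_slot
-- ===== SOURCE A (Python) =====
-- def check_config_file_exists_per_slot(output, args, **kwargs):
--     formats = [".conf", ".cfg", ".config", ".tgz"]
--
--     config_files = []
--     for filename in output.split():
--         for ending in formats:
--             if ending in filename:
--                 config_files.append(filename)
--
--     for config_file in config_files:
--         if args["config"] in config_file:
--             return True, True
--     return False, False
-- ===== SOURCE B (Python) =====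
-- def check_config_file_exists_per_slot(output, args, **kwargs):
--     formats = (".conf", ".cfg", ".config", ".tgz")
--     for filename in output.split():
--         if any(e in filename for e in formats) and args["config"] in filename:
--             return True, True
--     return False, False
-- ===== Notes on version B (the rewrite author's own statement) =====
-- stated objective: simpler
-- what changed: Single pass over output.split() with an immediate return on the first filename that both has a config-format ending and contains args['config'], instead of first materialising a config_files list (with duplicates) and then scanning it.
import Mathlib
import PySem

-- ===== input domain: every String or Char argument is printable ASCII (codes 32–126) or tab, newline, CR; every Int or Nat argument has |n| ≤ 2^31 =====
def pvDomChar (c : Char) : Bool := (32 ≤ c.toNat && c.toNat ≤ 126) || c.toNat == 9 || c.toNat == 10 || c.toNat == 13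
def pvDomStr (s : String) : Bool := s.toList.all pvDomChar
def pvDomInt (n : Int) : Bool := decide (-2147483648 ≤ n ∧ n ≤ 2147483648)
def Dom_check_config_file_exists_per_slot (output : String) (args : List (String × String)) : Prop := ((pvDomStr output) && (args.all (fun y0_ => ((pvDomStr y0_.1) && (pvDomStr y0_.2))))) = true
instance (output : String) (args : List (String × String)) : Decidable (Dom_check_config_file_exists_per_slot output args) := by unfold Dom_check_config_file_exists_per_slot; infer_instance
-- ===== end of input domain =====

-- B replaces A's two-phase "collect all format-matching filenames, then scan the list for
-- args['config']" with a single pass over output.split() returning at the first filename that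
-- matches both tests; same return value, no intermediate list (objective: simpler).

-- ===== PORT A =====
def pvFormats : List String := [".conf", ".cfg", ".config", ".tgz"]

-- `args["config"]`: Python raises KeyError when the key is missing; the `.getD ""` default is
-- only reachable when the second loop is empty (then it cannot affect the result) or outside Pre_.
def pvCfgA (args : List (String × String)) : String :=
  ((PySem.Dict.mk args).get? "config").getD ""

-- second loop of A: first config_file containing args["config"] → (True, True)
def pvFindLoop (cfg : String) : List String → Bool × Bool
  | [] => (false, false)
  | f :: rest => if PySem.Str.isIn cfg f then (true, true) else pvFindLoop cfg rest

def check_config_file_exists_per_slot (output : String) (args : List (String × String)) : Bool × Bool :=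
  let config_files :=
    (PySem.Str.split₀ output).foldl
      (fun acc filename =>
        pvFormats.foldl (fun a ending => if PySem.Str.isIn ending filename then a ++ [filename] else a) acc)
      []
  pvFindLoop (pvCfgA args) config_files

-- ===== PORT B =====
-- single loop of B with early return
def pvAltGo (args : List (String × String)) : List String → Bool × Bool
  | [] => (false, false)
  | filename :: rest =>
      if ([".conf", ".cfg", ".config", ".tgz"].any (fun e => PySem.Str.isIn e filename))
         && PySem.Str.isIn (((PySem.Dict.mk args).get? "config").getD "") filename then (true, true)
      else pvAltGo args rest

def check_config_file_exists_per_slot_alt (output : String) (args : List (String × String)) : Bool × Bool :=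
  pvAltGo args (PySem.Str.split₀ output)

-- ===== PRECONDITION & SPEC =====
-- Pre_ excludes exactly the inputs on which Python A raises KeyError: args lacks key "config"
-- while some whitespace-split token of output contains a format ending (so the lookup is reached).
def Pre_check_config_file_exists_per_slot (output : String) (args : List (String × String)) : Prop :=
  ((PySem.Dict.mk args).get? "config").isSome ∨
    ∀ f ∈ PySem.Str.split₀ output, ∀ e ∈ [".conf", ".cfg", ".config", ".tgz"], PySem.Str.isIn e f = false
instance (output : String) (args : List (String × String)) : Decidable (Pre_check_config_file_exists_per_slot output args) := by unfold Pre_check_config_file_exists_per_slot; infer_instance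

def pvWitness_check_config_file_exists_per_slot : String × (List (String × String)) :=
  ("run.cfg notes.txt", [("config", "run")])

def Spec_check_config_file_exists_per_slot (output : String) (args : List (String × String)) (out : Bool × Bool) : Prop := out = check_config_file_exists_per_slot_alt output args
instance (output : String) (args : List (String × String)) (out : Bool × Bool) : Decidable (Spec_check_config_file_exists_per_slot output args out) := by unfold Spec_check_config_file_exists_per_slot; infer_instance

-- ===== CLAIM (what is proved, stated in full; the proofs are below) =====
def Claim_equal_check_config_file_exists_per_slot : Prop := ∀ (output : String) (args : List (String × String)), Dom_check_config_file_exists_per_slot output args → Pre_check_config_file_exists_per_slot output args → Spec_check_config_file_exists_per_slot output args (check_config_file_exists_per_slot output args)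

-- ===== LEMMAS AND PROOFS =====

-- membership in the inner fold over the format list
theorem pv_inner_mem (filename x : String) (acc : List String) :
    x ∈ pvFormats.foldl (fun a ending => if PySem.Str.isIn ending filename then a ++ [filename] else a) acc ↔
      x ∈ acc ∨ (x = filename ∧ pvFormats.any (fun e => PySem.Str.isIn e filename) = true) := by
  simp only [pvFormats, List.foldl, List.any, Bool.or_eq_true]
  split_ifs <;> simp_all <;> tauto

-- membership in config_files
theorem pv_outer_mem (x : String) (toks : List String) (acc : List String) :
    x ∈ toks.foldl
        (fun acc filename =>
          pvFormats.foldl (fun a ending => if PySem.Str.isIn ending filename then a ++ [filename] else a) acc)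
        acc ↔
      x ∈ acc ∨ ∃ f ∈ toks, x = f ∧ pvFormats.any (fun e => PySem.Str.isIn e f) = true := by
  induction toks generalizing acc with
  | nil => simp
  | cons t rest ih =>
      rw [List.foldl_cons, ih, pv_inner_mem]
      simp only [List.mem_cons]
      constructor
      · rintro ((h | ⟨rfl, hm⟩) | ⟨g, hg, rfl, hm⟩)
        · exact Or.inl h
        · exact Or.inr ⟨x, Or.inl rfl, rfl, hm⟩
        · exact Or.inr ⟨x, Or.inr hg, rfl, hm⟩
      · rintro (h | ⟨g, (rfl | hg), rfl, hm⟩)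
        · exact Or.inl (Or.inl h)
        · exact Or.inl (Or.inr ⟨rfl, hm⟩)
        · exact Or.inr ⟨x, hg, rfl, hm⟩

theorem pv_findLoop_eq (cfg : String) (l : List String) :
    pvFindLoop cfg l = if l.any (fun f => PySem.Str.isIn cfg f) then (true, true) else (false, false) := by
  induction l with
  | nil => rfl
  | cons f rest ih =>
      simp only [pvFindLoop]
      conv_rhs => rw [List.any_cons]
      by_cases h : PySem.Str.isIn cfg f = true
      · rw [if_pos h, if_pos (by rw [h, Bool.true_or])]
      · rw [if_neg h, ih]
        rw [Bool.not_eq_true] at h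
        rw [h, Bool.false_or]

theorem pv_altGo_eq (args : List (String × String)) (l : List String) :
    pvAltGo args l =
      if l.any (fun f => ([".conf", ".cfg", ".config", ".tgz"].any (fun e => PySem.Str.isIn e f))
          && PySem.Str.isIn (((PySem.Dict.mk args).get? "config").getD "") f)
      then (true, true) else (false, false) := by
  induction l with
  | nil => rfl
  | cons f rest ih =>
      simp only [pvAltGo]
      conv_rhs => rw [List.any_cons]
      by_cases h : (([".conf", ".cfg", ".config", ".tgz"].any (fun e => PySem.Str.isIn e f))
          && PySem.Str.isIn (((PySem.Dict.mk args).get? "config").getD "") f) = true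
      · rw [if_pos h, if_pos (by rw [h, Bool.true_or])]
      · rw [if_neg h, ih]
        rw [Bool.not_eq_true] at h
        rw [h, Bool.false_or]

-- ===== VERDICT (by name: the statement is the Claim_ definition above) =====
theorem check_config_file_exists_per_slot_spec : Claim_equal_check_config_file_exists_per_slot := by
  intro output args _ _
  unfold Spec_check_config_file_exists_per_slot
  unfold check_config_file_exists_per_slot check_config_file_exists_per_slot_alt
  rw [pv_findLoop_eq, pv_altGo_eq]
  congr 1
  rw [eq_iff_iff]
  simp only [List.any_eq_true, Bool.and_eq_true, pvCfgA]
  constructor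
  · rintro ⟨x, hx, hin⟩
    rw [pv_outer_mem] at hx
    rcases hx with h | ⟨g, hg, rfl, hm⟩
    · simp at h
    · exact ⟨x, hg, by simpa [pvFormats] using hm, hin⟩
  · rintro ⟨f, hf, hm, hin⟩
    exact ⟨f, by rw [pv_outer_mem]; exact Or.inr ⟨f, hf, rfl, by simpa [pvFormats] using hm⟩, hin⟩
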